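-- pv_equiv track=rewrite | github.com/SamuelH91/Civ6EGRM | saveFileHandler/gameDataHandler.py | findLastCivCityIdx
-- ===== SOURCE A (Python) =====
-- def findLastCivCityIdx(cityData, civIdx):
--     maxCivCityOrderIdx = -1
--     maxCivCityOrderIdx1 = -1
--     for city in cityData["cities"]:
--         if city["CivIndex"] == civIdx:
--             if maxCivCityOrderIdx < city["CivCityOrderIdx"]:
--                 maxCivCityOrderIdx = city["CivCityOrderIdx"]
--             if maxCivCityOrderIdx1 < city["CivCityOrderIdx1"]:
--                 maxCivCityOrderIdx1 = city["CivCityOrderIdx1"]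
--     return maxCivCityOrderIdx, maxCivCityOrderIdx1
-- ===== SOURCE B (Python) =====
-- def findLastCivCityIdx(cityData, civIdx):
--     cities = cityData["cities"]
--     xs = sorted([-1] + [c["CivCityOrderIdx"] for c in cities if c["CivIndex"] == civIdx])
--     ys = sorted([-1] + [c["CivCityOrderIdx1"] for c in cities if c["CivIndex"] == civIdx])
--     return (xs[-1], ys[-1])
-- ===== Notes on version B (the rewrite author's own statement) =====
-- stated objective: alternative
-- what changed: Computes each result by sorting the matched order indices together with the -1 sentinel and taking the last element of the sorted list, instead of A's fused single-pass loop with two running-max accumulators.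
import Mathlib
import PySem

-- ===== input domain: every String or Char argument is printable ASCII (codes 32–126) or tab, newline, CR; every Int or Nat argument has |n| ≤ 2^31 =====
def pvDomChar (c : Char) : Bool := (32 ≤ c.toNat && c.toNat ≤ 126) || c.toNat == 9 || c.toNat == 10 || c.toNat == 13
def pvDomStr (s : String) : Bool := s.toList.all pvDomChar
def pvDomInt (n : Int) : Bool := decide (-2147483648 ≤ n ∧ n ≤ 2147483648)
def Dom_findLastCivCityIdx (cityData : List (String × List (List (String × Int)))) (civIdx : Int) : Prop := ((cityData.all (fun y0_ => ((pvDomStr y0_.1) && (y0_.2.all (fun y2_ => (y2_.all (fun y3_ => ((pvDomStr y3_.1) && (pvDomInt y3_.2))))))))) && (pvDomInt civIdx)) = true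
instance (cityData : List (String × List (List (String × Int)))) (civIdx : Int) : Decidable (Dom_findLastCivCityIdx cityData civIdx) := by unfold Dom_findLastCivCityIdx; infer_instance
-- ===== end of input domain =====

-- B computes each maximum by sorting the matched order indices (with the -1 sentinel included)
-- and taking the last element, instead of A's fused single-pass two-accumulator loop; objective: alternative.
-- Dict lookups are first-match association-list lookups (List.lookup), exact for Python dicts under the type convention.

-- ===== PORT A =====
def findLastCivCityIdx (cityData : List (String × List (List (String × Int)))) (civIdx : Int) : Int × Int :=
  let cities := (cityData.lookup "cities").getD []
  cities.foldl (fun (st : Int × Int) city =>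
    if (city.lookup "CivIndex").getD 0 == civIdx then
      (if st.1 < (city.lookup "CivCityOrderIdx").getD 0 then (city.lookup "CivCityOrderIdx").getD 0 else st.1,
       if st.2 < (city.lookup "CivCityOrderIdx1").getD 0 then (city.lookup "CivCityOrderIdx1").getD 0 else st.2)
    else st) (-1, -1)

-- ===== PORT B =====
def findLastCivCityIdx_alt (cityData : List (String × List (List (String × Int)))) (civIdx : Int) : Int × Int :=
  let cities := (cityData.lookup "cities").getD []
  let xs := PySem.List.sorted ((-1 : Int) ::
    (cities.filter (fun c => (c.lookup "CivIndex").getD 0 == civIdx)).map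
      (fun c => (c.lookup "CivCityOrderIdx").getD 0)) (fun x => x) false
  let ys := PySem.List.sorted ((-1 : Int) ::
    (cities.filter (fun c => (c.lookup "CivIndex").getD 0 == civIdx)).map
      (fun c => (c.lookup "CivCityOrderIdx1").getD 0)) (fun x => x) false
  ((PySem.List.pyGet? xs (-1)).getD 0, (PySem.List.pyGet? ys (-1)).getD 0)

-- ===== PRECONDITION & SPEC =====
-- Pre_ excludes exactly the inputs on which Python A raises KeyError: a missing "cities" key,
-- a city without "CivIndex", or a matching city without one of the two order-index keys.
def Pre_findLastCivCityIdx (cityData : List (String × List (List (String × Int)))) (civIdx : Int) : Prop :=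
  (cityData.lookup "cities").isSome = true ∧
  ∀ c ∈ (cityData.lookup "cities").getD [],
    (c.lookup "CivIndex").isSome = true ∧
    ((c.lookup "CivIndex").getD 0 = civIdx →
      (c.lookup "CivCityOrderIdx").isSome = true ∧ (c.lookup "CivCityOrderIdx1").isSome = true)
instance (cityData : List (String × List (List (String × Int)))) (civIdx : Int) : Decidable (Pre_findLastCivCityIdx cityData civIdx) := by unfold Pre_findLastCivCityIdx; infer_instance

def pvWitness_findLastCivCityIdx : (List (String × List (List (String × Int)))) × Int :=
  ([("cities", [[("CivIndex", 1), ("CivCityOrderIdx", 3), ("CivCityOrderIdx1", 2)],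
                [("CivIndex", 0), ("CivCityOrderIdx", 7), ("CivCityOrderIdx1", 9)]])], 1)

def Spec_findLastCivCityIdx (cityData : List (String × List (List (String × Int)))) (civIdx : Int) (out : Int × Int) : Prop := out = findLastCivCityIdx_alt cityData civIdx
instance (cityData : List (String × List (List (String × Int)))) (civIdx : Int) (out : Int × Int) : Decidable (Spec_findLastCivCityIdx cityData civIdx out) := by unfold Spec_findLastCivCityIdx; infer_instance

-- ===== CLAIM (what is proved, stated in full; the proofs are below) =====
def Claim_equal_findLastCivCityIdx : Prop := ∀ (cityData : List (String × List (List (String × Int)))) (civIdx : Int), Dom_findLastCivCityIdx cityData civIdx → Pre_findLastCivCityIdx cityData civIdx → Spec_findLastCivCityIdx cityData civIdx (findLastCivCityIdx cityData civIdx)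

-- ===== LEMMAS AND PROOFS =====
lemma if_lt_eq_max (a v : Int) : (if a < v then v else a) = max a v := by
  split <;> omega

-- A's fused loop splits into the two per-field running maxima over the matching cities.
lemma loop_eq (civIdx : Int) (cities : List (List (String × Int))) (a b : Int) :
    cities.foldl (fun (st : Int × Int) city =>
      if (city.lookup "CivIndex").getD 0 == civIdx then
        (if st.1 < (city.lookup "CivCityOrderIdx").getD 0 then (city.lookup "CivCityOrderIdx").getD 0 else st.1,
         if st.2 < (city.lookup "CivCityOrderIdx1").getD 0 then (city.lookup "CivCityOrderIdx1").getD 0 else st.2)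
      else st) (a, b)
    = (((cities.filter (fun c => (c.lookup "CivIndex").getD 0 == civIdx)).map
          (fun c => (c.lookup "CivCityOrderIdx").getD 0)).foldl max a,
       ((cities.filter (fun c => (c.lookup "CivIndex").getD 0 == civIdx)).map
          (fun c => (c.lookup "CivCityOrderIdx1").getD 0)).foldl max b) := by
  induction cities generalizing a b with
  | nil => simp
  | cons c rest ih =>
    by_cases h : ((c.lookup "CivIndex").getD 0 == civIdx) = true
    · rw [List.foldl_cons, if_pos h, ih]
      simp [h, if_lt_eq_max]
    · rw [List.foldl_cons, if_neg h, ih]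
      simp [h]

-- in a ≤-pairwise list every element is ≤ the last one
lemma mem_le_getLast {s : List Int} (hp : s.Pairwise (· ≤ ·)) {x : Int} (hx : x ∈ s)
    (h : s ≠ []) : x ≤ s.getLast h := by
  induction s with
  | nil => cases hx
  | cons y t ih =>
    rcases List.pairwise_cons.mp hp with ⟨hy, ht⟩
    cases t with
    | nil => simp at hx; simp [hx]
    | cons z u =>
      rw [List.getLast_cons (by simp)]
      rcases List.mem_cons.mp hx with rfl | hx'
      · exact le_trans (hy _ (List.getLast_mem _)) (le_refl _)
      · exact ih ht hx' (by simp)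

-- last of sorted(a :: l) is the running max of l seeded with a
lemma sorted_last_eq_foldl_max (a : Int) (l : List Int) :
    (PySem.List.pyGet? (PySem.List.sorted (a :: l) (fun x => x) false) (-1)).getD 0
      = l.foldl max a := by
  have hne : PySem.List.sorted (a :: l) (fun x => x) false ≠ [] := by
    intro h
    exact (List.cons_ne_nil a l) ((PySem.List.sorted_eq_nil_iff _ _ _).mp h)
  rw [PySem.List.pyGet?_neg_one, List.getLast?_eq_some_getLast hne]
  simp only [Option.getD_some]
  have hpw : (PySem.List.sorted (a :: l) (fun x : Int => x) false).Pairwise (· ≤ ·) := by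
    have := PySem.List.sorted_pairwise (xs := a :: l) (key := fun x : Int => x)
    simpa using this
  have hmax := PySem.List.le_foldl_max l a
  -- M ≤ last
  have hMmem : l.foldl max a ∈ PySem.List.sorted (a :: l) (fun x : Int => x) false := by
    rw [PySem.List.mem_sorted]
    rcases PySem.List.foldl_max_mem l a with h | h
    · rw [h]; exact List.mem_cons_self
    · exact List.mem_cons_of_mem _ h
  have h1 : l.foldl max a ≤ (PySem.List.sorted (a :: l) (fun x : Int => x) false).getLast hne :=
    mem_le_getLast hpw hMmem hne
  -- last ≤ M
  have hlmem : (PySem.List.sorted (a :: l) (fun x : Int => x) false).getLast hne ∈ a :: l := by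
    rw [← PySem.List.mem_sorted (key := fun x : Int => x) (rev := false)]
    exact List.getLast_mem hne
  have h2 : (PySem.List.sorted (a :: l) (fun x : Int => x) false).getLast hne ≤ l.foldl max a := by
    rcases List.mem_cons.mp hlmem with h | h
    · rw [h]; exact hmax.1
    · exact hmax.2 _ h
  omega

-- ===== VERDICT (by name: the statement is the Claim_ definition above) =====
theorem findLastCivCityIdx_spec : Claim_equal_findLastCivCityIdx := by
  intro cityData civIdx _ _
  unfold Spec_findLastCivCityIdx findLastCivCityIdx findLastCivCityIdx_alt
  rw [loop_eq]
  simp only [sorted_last_eq_foldl_max]
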